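-- pv_equiv track=rewrite | github.com/cjfal2/aLGoRiTHM | 백준/Bronze/1668. 트로피 진열/트로피 진열.py | solve
-- ===== SOURCE A (Python) =====
-- def solve(trophies):
--     left = 1
--     right = 1
--
--     left_max = trophies[0]
--     for trophy in trophies[1:]:
--         if trophy > left_max:
--             left += 1
--             left_max = trophy
--
--     right_max = trophies[-1]
--     for trophy in reversed(trophies[:-1]):
--         if trophy > right_max:
--             right += 1
--             right_max = trophy
--
--     return left, right
-- ===== SOURCE B (Python) =====
-- def _runmax(xs):
--     out = []
--     m = None
--     for x in xs:
--         if m is None or x > m: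
--             m = x
--         out.append(m)
--     return out
--
--
-- def solve(trophies):
--     fwd = _runmax(trophies)
--     bwd = _runmax(list(reversed(trophies)))
--     return len(set(fwd)), len(set(bwd))
-- ===== Notes on version B (the rewrite author's own statement) =====
-- stated objective: alternative
-- what changed: B materialises the forward and backward running-maximum tables and returns the number of DISTINCT values in each (len(set(...))) instead of A's interleaved compare-and-count loops with a mutable counter.
import Mathlib
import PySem

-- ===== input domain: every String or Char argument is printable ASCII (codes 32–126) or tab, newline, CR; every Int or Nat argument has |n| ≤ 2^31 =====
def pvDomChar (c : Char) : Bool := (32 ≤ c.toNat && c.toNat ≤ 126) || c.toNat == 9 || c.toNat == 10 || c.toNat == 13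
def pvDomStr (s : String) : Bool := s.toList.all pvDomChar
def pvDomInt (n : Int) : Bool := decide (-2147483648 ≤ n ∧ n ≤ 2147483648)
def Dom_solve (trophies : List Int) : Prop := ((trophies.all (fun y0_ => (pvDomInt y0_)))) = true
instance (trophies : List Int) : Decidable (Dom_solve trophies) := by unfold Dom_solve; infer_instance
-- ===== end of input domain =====

-- B counts the distinct values of the materialised forward/backward running-maximum tables
-- instead of A's interleaved compare-and-count loops; same O(n) cost, different decomposition.

-- ===== PORT A =====
def solve (trophies : List Int) : Int × Int :=
  match PySem.List.pyGet? trophies 0, PySem.List.pyGet? trophies (-1) with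
  | some leftMax0, some rightMax0 =>
    let pL := (PySem.List.slice trophies (some 1) none).foldl
        (fun (s : Int × Int) t => if t > s.2 then (s.1 + 1, t) else s) (1, leftMax0)
    let pR := ((PySem.List.slice trophies none (some (-1))).reverse).foldl
        (fun (s : Int × Int) t => if t > s.2 then (s.1 + 1, t) else s) (1, rightMax0)
    (pL.1, pR.1)
  | _, _ => (0, 0)   -- unreachable under Pre_solve (Python raises IndexError on [])

-- ===== PORT B =====
-- helper _runmax: running-maximum table, current max kept as Option (None before the first element)
def runmax (xs : List Int) : List Int :=
  (xs.foldl
    (fun (s : Option Int × List Int) x =>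
      let m : Int := match s.1 with
        | none => x
        | some m0 => if x > m0 then x else m0
      (some m, s.2 ++ [m]))
    (none, [])).2

def solve_alt (trophies : List Int) : Int × Int :=
  let fwd := runmax trophies
  let bwd := runmax trophies.reverse
  ((PySem.Set.len (PySem.Set.ofList fwd) : Int), (PySem.Set.len (PySem.Set.ofList bwd) : Int))

-- ===== PRECONDITION & SPEC =====
-- Pre_ excludes only the empty list, on which Python A raises IndexError (trophies[0]).
def Pre_solve (trophies : List Int) : Prop := trophies ≠ []
instance (trophies : List Int) : Decidable (Pre_solve trophies) := by unfold Pre_solve; infer_instance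
def pvWitness_solve : List Int := [3, 1, 4]

def Spec_solve (trophies : List Int) (out : Int × Int) : Prop := out = solve_alt trophies
instance (trophies : List Int) (out : Int × Int) : Decidable (Spec_solve trophies out) := by unfold Spec_solve; infer_instance

-- ===== CLAIM (what is proved, stated in full; the proofs are below) =====
def Claim_equal_solve : Prop := ∀ (trophies : List Int), Dom_solve trophies → Pre_solve trophies → Spec_solve trophies (solve trophies)

-- ===== LEMMAS AND PROOFS =====

-- running-max table of t when the current maximum is m (proof-side recursion)
def rmFrom (m : Int) : List Int → List Int
  | [] => []
  | x :: t => (if x > m then x else m) :: rmFrom (if x > m then x else m) t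

theorem runmax_bridge (t : List Int) (m : Int) (acc : List Int) :
    (t.foldl
      (fun (s : Option Int × List Int) x =>
        let mm : Int := match s.1 with
          | none => x
          | some m0 => if x > m0 then x else m0
        (some mm, s.2 ++ [mm]))
      (some m, acc)).2 = acc ++ rmFrom m t := by
  induction t generalizing m acc with
  | nil => simp [rmFrom]
  | cons x t ih => simp [rmFrom, ih, List.append_assoc]

theorem runmax_cons (h : Int) (t : List Int) : runmax (h :: t) = h :: rmFrom h t := by
  simp [runmax, List.foldl_cons, runmax_bridge]

theorem main_lemma (t : List Int) : ∀ (S : List Int) (m : Int), m ∈ S → (∀ y ∈ S, y ≤ m) →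
    (t.foldl (fun (s : Int × Int) x => if x > s.2 then (s.1 + 1, x) else s)
        ((S.length : Int), m)).1
      = ((PySem.Set.update S (rmFrom m t)).length : Int) := by
  induction t with
  | nil => intro S m _ _; simp [rmFrom, PySem.Set.update]
  | cons x t ih =>
    intro S m hmem hmax
    by_cases hx : x > m
    · have hnot : x ∉ S := fun hxS => absurd (hmax x hxS) (by omega)
      have hadd : PySem.Set.add S x = S ++ [x] := by
        simp [PySem.Set.add, PySem.Set.contains, hnot]
      have hlen : ((S.length : Int)) + 1 = (((S ++ [x]).length : Nat) : Int) := by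
        push_cast [List.length_append]; simp
      have hmem' : x ∈ S ++ [x] := by simp
      have hmax' : ∀ y ∈ S ++ [x], y ≤ x := by
        intro y hy
        rcases List.mem_append.mp hy with h1 | h1
        · exact le_of_lt (lt_of_le_of_lt (hmax y h1) hx)
        · simp at h1; omega
      have := ih (S ++ [x]) x hmem' hmax'
      simp only [rmFrom, if_pos hx, PySem.Set.update, List.foldl_cons, hadd]
      rw [hlen]; exact this
    · have hadd : PySem.Set.add S m = S := by
        simp [PySem.Set.add, PySem.Set.contains, hmem]
      have := ih S m hmem hmax
      simp only [rmFrom, if_neg hx, PySem.Set.update, List.foldl_cons, hadd]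
      exact this

theorem count_eq (h : Int) (t : List Int) :
    (t.foldl (fun (s : Int × Int) x => if x > s.2 then (s.1 + 1, x) else s) (1, h)).1
      = ((PySem.Set.ofList (runmax (h :: t))).length : Int) := by
  have h1 : ((([h] : List Int).length : Nat) : Int) = 1 := by simp
  have := main_lemma t [h] h (by simp) (by intro y hy; simp at hy; omega)
  rw [h1] at this
  rw [this, runmax_cons]
  simp [PySem.Set.ofList, PySem.Set.update, List.foldl_cons]

theorem reverse_eq_getLast_cons (h : Int) (t : List Int) :
    (h :: t).reverse = (h :: t).getLast (by simp) :: (h :: t).dropLast.reverse := by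
  conv_lhs => rw [← List.dropLast_append_getLast (l := h :: t) (by simp)]
  simp

-- ===== VERDICT (by name: the statement is the Claim_ definition above) =====
theorem solve_spec : Claim_equal_solve := by
  intro trophies _ hpre
  unfold Spec_solve
  match trophies, hpre with
  | h :: t, _ =>
    have hlast : PySem.List.pyGet? (h :: t) (-1) = some ((h :: t).getLast (by simp)) := by
      rw [PySem.List.pyGet?_neg_one, List.getLast?_eq_some_getLast]
    unfold solve solve_alt
    rw [PySem.List.pyGet?_zero_cons, hlast]
    simp only [PySem.List.slice_from_one, PySem.List.slice_to_neg_one, List.tail_cons]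
    rw [count_eq h t]
    have hrev := reverse_eq_getLast_cons h t
    have := count_eq ((h :: t).getLast (by simp)) ((h :: t).dropLast.reverse)
    rw [← hrev] at this
    rw [this]
    rfl
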